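-- pv_equiv track=rewrite | github.com/nemmiz/aoc2020 | python/16.py | get_invalid_numbers
-- ===== SOURCE A (Python) =====
-- def within_range(rule, number):
--     if number >= rule[1] and number <= rule[2]:
--         return True
--     if number >= rule[3] and number <= rule[4]:
--         return True
--     return False
--
-- def get_invalid_numbers(rules, numbers):
--     invalid = []
--     for number in numbers:
--         for rule in rules:
--             if within_range(rule, number):
--                 break
--         else:
--             invalid.append(number)
--     return invalid
-- ===== SOURCE B (Python) =====
-- def get_invalid_numbers(rules, numbers):
--     # Collect both ranges of every rule, sort by start, merge into disjoint
--     # intervals, then binary-search each number for coverage.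
--     intervals = []
--     for rule in rules:
--         intervals.append((rule[1], rule[2]))
--         intervals.append((rule[3], rule[4]))
--     intervals.sort(key=lambda iv: iv[0])
--     merged = []
--     for lo, hi in intervals:
--         if merged and lo <= merged[-1][1]:
--             if hi > merged[-1][1]:
--                 merged[-1] = (merged[-1][0], hi)
--         else:
--             merged.append((lo, hi))
--     invalid = []
--     for n in numbers:
--         lo, hi = 0, len(merged)
--         while lo < hi:
--             mid = (lo + hi) // 2
--             if merged[mid][0] <= n:
--                 lo = mid + 1
--             else:
--                 hi = mid
--         if lo == 0 or n > merged[lo - 1][1]: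
--             invalid.append(n)
--     return invalid
-- ===== Notes on version B (the rewrite author's own statement) =====
-- stated objective: alternative
-- what changed: Instead of scanning every rule for every number (number-outer linear scan with break/else), B sorts the 2R rule intervals once, merges them into disjoint intervals, and binary-searches each number for coverage (O((N+R) log R) work vs A's O(N*R); not confirmed, so no speed is claimed).
-- outside the precondition, e.g. on get_invalid_numbers([[1]], []): A returns [], B raises IndexError; on get_invalid_numbers([[0, 0, 5, 0, 5], [1]], [3]): A returns [], B raises IndexError
import Mathlib
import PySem

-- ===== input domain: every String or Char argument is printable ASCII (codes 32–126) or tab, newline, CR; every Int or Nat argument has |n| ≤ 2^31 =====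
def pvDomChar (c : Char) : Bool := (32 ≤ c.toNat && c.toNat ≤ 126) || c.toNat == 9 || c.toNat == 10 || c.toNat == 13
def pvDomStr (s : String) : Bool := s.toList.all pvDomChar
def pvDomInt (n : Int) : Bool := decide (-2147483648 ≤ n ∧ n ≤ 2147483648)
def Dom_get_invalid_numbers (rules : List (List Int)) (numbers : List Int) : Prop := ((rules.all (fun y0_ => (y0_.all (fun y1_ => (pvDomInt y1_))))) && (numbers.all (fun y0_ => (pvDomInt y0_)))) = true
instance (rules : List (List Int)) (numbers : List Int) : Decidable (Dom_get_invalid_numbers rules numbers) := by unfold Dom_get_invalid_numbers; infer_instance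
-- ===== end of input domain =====

-- B replaces A's per-number scan over all rules by sort-merge of the rule
-- intervals plus a binary search per number (a different algorithm; O((N+R) log R)
-- work vs A's O(N*R), though no speed-up was measured).


-- ===== PORT A =====
def within_range (rule : List Int) (number : Int) : Bool :=
  if PySem.List.pyGetD rule 1 0 ≤ number ∧ number ≤ PySem.List.pyGetD rule 2 0 then true
  else if PySem.List.pyGetD rule 3 0 ≤ number ∧ number ≤ PySem.List.pyGetD rule 4 0 then true
  else false

-- the inner 'for rule in rules: … break / else:' loop of A
def coveredByAny (rules : List (List Int)) (number : Int) : Bool :=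
  match rules with
  | [] => false
  | r :: rs => if within_range r number then true else coveredByAny rs number

def get_invalid_numbers (rules : List (List Int)) (numbers : List Int) : List Int :=
  numbers.foldl
    (fun invalid number =>
      if coveredByAny rules number then invalid else invalid ++ [number]) []

-- ===== PORT B =====
-- one step of B's merge loop: extend or append to 'merged' (merged[-1] handling)
def mergeStep (merged : List (Int × Int)) (iv : Int × Int) : List (Int × Int) :=
  if merged ≠ [] ∧ iv.1 ≤ (PySem.List.pyGetD merged (-1) (0, 0)).2 then
    if (PySem.List.pyGetD merged (-1) (0, 0)).2 < iv.2 then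
      PySem.List.pySetD merged (-1) ((PySem.List.pyGetD merged (-1) (0, 0)).1, iv.2)
    else merged
  else merged ++ [iv]

-- B's hand-written binary search: rightmost position whose start is ≤ n
def bsearch (merged : List (Int × Int)) (n : Int) (lo hi : Int) : Int :=
  if h : lo < hi then
    let mid := PySem.Int.floordiv (lo + hi) 2
    if (PySem.List.pyGetD merged mid (0, 0)).1 ≤ n then bsearch merged n (mid + 1) hi
    else bsearch merged n lo mid
  else lo
termination_by (hi - lo).toNat
decreasing_by
  all_goals
    have h1 := (PySem.Int.floordiv_two_mid_bounds (lo := lo) (hi := hi) (le_of_lt h)).1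
    have h2 : PySem.Int.floordiv (lo + hi) 2 < hi :=
      (PySem.Int.floordiv_lt_iff_lt_mul (by omega)).mpr (by omega)
    omega

def get_invalid_numbers_alt (rules : List (List Int)) (numbers : List Int) : List Int :=
  let intervals := rules.foldl
    (fun acc rule =>
      acc ++ [(PySem.List.pyGetD rule 1 0, PySem.List.pyGetD rule 2 0),
              (PySem.List.pyGetD rule 3 0, PySem.List.pyGetD rule 4 0)]) []
  let sortedIvs := PySem.List.sorted intervals (fun iv => iv.1) false
  let merged := sortedIvs.foldl mergeStep []
  numbers.foldl
    (fun invalid n =>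
      let lo := bsearch merged n 0 (PySem.List.len merged)
      if lo = 0 ∨ (PySem.List.pyGetD merged (lo - 1) (0, 0)).2 < n then invalid ++ [n]
      else invalid) []

-- ===== PRECONDITION & SPEC =====
-- Pre_ excludes rules shorter than 5 entries: there within_range's rule[1..4]
-- raises IndexError (A raises whenever such a rule is actually consulted; B,
-- which reads every rule's bounds up front, raises on any such input).
def Pre_get_invalid_numbers (rules : List (List Int)) (numbers : List Int) : Prop :=
  ∀ r ∈ rules, 5 ≤ r.length

instance (rules : List (List Int)) (numbers : List Int) : Decidable (Pre_get_invalid_numbers rules numbers) := by unfold Pre_get_invalid_numbers; infer_instance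

def pvWitness_get_invalid_numbers : List (List Int) × List Int :=
  ([[0, 1, 3, 7, 9], [0, 5, 6, 20, 25]], [2, 4, 8, 21, 30])

def Spec_get_invalid_numbers (rules : List (List Int)) (numbers : List Int) (out : List Int) : Prop := out = get_invalid_numbers_alt rules numbers
instance (rules : List (List Int)) (numbers : List Int) (out : List Int) : Decidable (Spec_get_invalid_numbers rules numbers out) := by unfold Spec_get_invalid_numbers; infer_instance

-- ===== CLAIM (what is proved, stated in full; the proofs are below) =====
def Claim_equal_get_invalid_numbers : Prop := ∀ (rules : List (List Int)) (numbers : List Int), Dom_get_invalid_numbers rules numbers → Pre_get_invalid_numbers rules numbers → Spec_get_invalid_numbers rules numbers (get_invalid_numbers rules numbers)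

-- ===== LEMMAS AND PROOFS =====

-- n is covered by one of the intervals in l
def Cov (n : Int) (l : List (Int × Int)) : Prop := ∃ iv ∈ l, iv.1 ≤ n ∧ n ≤ iv.2

-- invariant of B's merged list: starts nondecreasing, and every later
-- interval starts strictly after every earlier interval ends
def Good (l : List (Int × Int)) : Prop := l.Pairwise (fun p q => p.1 ≤ q.1 ∧ p.2 < q.1)

-- the interval list B builds from the rules, as a flatMap
def ivsOf (rules : List (List Int)) : List (Int × Int) :=
  rules.flatMap (fun rule =>
    [(PySem.List.pyGetD rule 1 0, PySem.List.pyGetD rule 2 0),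
     (PySem.List.pyGetD rule 3 0, PySem.List.pyGetD rule 4 0)])

lemma coveredByAny_iff (rules : List (List Int)) (n : Int) :
    coveredByAny rules n = true ↔ Cov n (ivsOf rules) := by
  induction rules with
  | nil => simp [coveredByAny, Cov, ivsOf]
  | cons r rs ih =>
      simp only [coveredByAny, within_range, ivsOf, List.flatMap_cons] at *
      by_cases h1 : PySem.List.pyGetD r 1 0 ≤ n ∧ n ≤ PySem.List.pyGetD r 2 0 <;>
        by_cases h2 : PySem.List.pyGetD r 3 0 ≤ n ∧ n ≤ PySem.List.pyGetD r 4 0 <;>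
          simp [h1, h2, Cov, ih] at * <;> tauto

lemma pySetD_neg_one_concat {α : Type} (ms : List α) (m v : α) :
    PySem.List.pySetD (ms ++ [m]) (-1) v = ms ++ [v] := by
  simp [PySem.List.pySetD, PySem.List.pySet?, PySem.List.pyIdx?]

-- one merge step, on a nonempty accumulator written as ms ++ [m]
lemma mergeStep_concat (ms : List (Int × Int)) (m iv : Int × Int) :
    mergeStep (ms ++ [m]) iv =
      if iv.1 ≤ m.2 then
        (if m.2 < iv.2 then ms ++ [(m.1, iv.2)] else ms ++ [m])
      else (ms ++ [m]) ++ [iv] := by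
  simp only [mergeStep, PySem.List.pyGetD_neg_one_append_singleton,
    pySetD_neg_one_concat, ne_eq, List.append_eq_nil_iff, List.cons_ne_self,
    and_false, not_false_eq_true, true_and]

lemma mergeStep_nil (iv : Int × Int) : mergeStep [] iv = [iv] := by
  simp [mergeStep]

lemma cov_append (n : Int) (xs ys : List (Int × Int)) :
    Cov n (xs ++ ys) ↔ Cov n xs ∨ Cov n ys := by
  simp [Cov, List.mem_append, or_and_right, exists_or]

lemma cov_cons (n : Int) (x : Int × Int) (xs : List (Int × Int)) :
    Cov n (x :: xs) ↔ (x.1 ≤ n ∧ n ≤ x.2) ∨ Cov n xs := by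
  simp [Cov, List.mem_cons, or_and_right, exists_or]

lemma cov_singleton (n : Int) (x : Int × Int) :
    Cov n [x] ↔ x.1 ≤ n ∧ n ≤ x.2 := by
  simp [Cov]

lemma merge_inv (l : List (Int × Int)) :
    ∀ acc : List (Int × Int), Good acc →
      l.Pairwise (fun p q => p.1 ≤ q.1) →
      (∀ iv ∈ l, ∀ m ∈ acc, m.1 ≤ iv.1) →
      Good (l.foldl mergeStep acc) ∧
        (∀ n, Cov n (l.foldl mergeStep acc) ↔ Cov n acc ∨ Cov n l) := by
  induction l with
  | nil =>
      intro acc hg _ _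
      exact ⟨hg, fun n => by simp [Cov]⟩
  | cons iv rest ih =>
      intro acc hg hp hfirst
      have hpr : rest.Pairwise (fun p q => p.1 ≤ q.1) := hp.of_cons
      have hiv_rest : ∀ q ∈ rest, iv.1 ≤ q.1 := fun q hq => List.rel_of_pairwise_cons hp hq
      simp only [List.foldl_cons]
      rcases acc.eq_nil_or_concat' with hnil | ⟨ms, m, rfl⟩
      · subst hnil
        rw [mergeStep_nil]
        have h := ih [iv] (by simp [Good]) hpr
          (by intro q hq a ha; simp at ha; subst ha; exact hiv_rest q hq)
        refine ⟨h.1, fun n => ?_⟩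
        rw [h.2 n, cov_singleton, cov_cons]
        simp [Cov]
      · have hm_iv : m.1 ≤ iv.1 := hfirst iv (by simp) m (by simp)
        have hgm : Good ms ∧ ∀ a ∈ ms, a.1 ≤ m.1 ∧ a.2 < m.1 := by
          simpa [Good, List.pairwise_append] using hg
        rw [mergeStep_concat]
        by_cases h1 : iv.1 ≤ m.2
        · by_cases h2 : m.2 < iv.2
          · -- extend the last interval to (m.1, iv.2)
            simp only [h1, h2, if_true]
            have hg' : Good (ms ++ [(m.1, iv.2)]) := by
              simp only [Good, List.pairwise_append]
              refine ⟨hgm.1, by simp, ?_⟩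
              intro a ha b hb; simp at hb; subst hb
              exact ⟨(hgm.2 a ha).1, (hgm.2 a ha).2⟩
            have h := ih (ms ++ [(m.1, iv.2)]) hg' hpr
              (by intro q hq a ha
                  rcases List.mem_append.1 ha with h' | h'
                  · exact le_trans (le_trans (hgm.2 a h').1 hm_iv) (hiv_rest q hq)
                  · simp at h'
                    have : a.1 = m.1 := by rw [h']
                    rw [this]; exact le_trans hm_iv (hiv_rest q hq))
            refine ⟨h.1, fun n => ?_⟩
            rw [h.2 n, cov_append, cov_append, cov_singleton, cov_singleton, cov_cons]
            constructor
            · rintro ((c | c) | c)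
              · tauto
              · by_cases hn : n ≤ m.2
                · exact Or.inl (Or.inr ⟨c.1, hn⟩)
                · exact Or.inr (Or.inl ⟨by omega, c.2⟩)
              · tauto
            · rintro ((c | c) | c | c)
              · tauto
              · exact Or.inl (Or.inr ⟨c.1, by omega⟩)
              · exact Or.inl (Or.inr ⟨by omega, c.2⟩)
              · tauto
          · -- iv lies inside the last interval: drop it
            simp only [h1, h2, if_true, if_false]
            have h := ih (ms ++ [m]) hg hpr
              (fun q hq a ha => le_trans (hfirst iv (by simp) a ha) (hiv_rest q hq))
            refine ⟨h.1, fun n => ?_⟩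
            rw [h.2 n, cov_append, cov_singleton, cov_cons]
            constructor
            · tauto
            · rintro ((c | c) | c | c)
              · tauto
              · tauto
              · exact Or.inl (Or.inr ⟨by omega, by omega⟩)
              · tauto
        · -- gap: append iv as a new interval
          simp only [h1, if_false]
          have hg' : Good ((ms ++ [m]) ++ [iv]) := by
            simp only [Good, List.pairwise_append]
            refine ⟨by simpa [Good, List.pairwise_append] using hg, by simp, ?_⟩
            intro a ha b hb; simp at hb; subst hb
            rcases List.mem_append.1 ha with h' | h'
            · exact ⟨le_trans (hgm.2 a h').1 hm_iv, by have := (hgm.2 a h').2; omega⟩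
            · simp at h'
              have e1 : a.1 = m.1 := by rw [h']
              have e2 : a.2 = m.2 := by rw [h']
              exact ⟨by omega, by omega⟩
          have h := ih ((ms ++ [m]) ++ [iv]) hg' hpr
            (by intro q hq a ha
                rcases List.mem_append.1 ha with h' | h'
                · exact le_trans (hfirst iv (by simp) a h') (hiv_rest q hq)
                · simp at h'
                  have : a.1 = iv.1 := by rw [h']
                  rw [this]; exact hiv_rest q hq)
          refine ⟨h.1, fun n => ?_⟩
          rw [h.2 n, cov_append, cov_singleton, cov_cons]
          tauto

-- bsearch invariant: final position separates starts ≤ n from starts > n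
lemma bsearch_spec (merged : List (Int × Int)) (n : Int) :
    ∀ k (lo hi : Int), (hi - lo).toNat = k → 0 ≤ lo → lo ≤ hi → hi ≤ merged.length →
      (lo = 0 ∨ (PySem.List.pyGetD merged (lo - 1) (0, 0)).1 ≤ n) →
      (hi = merged.length ∨ n < (PySem.List.pyGetD merged hi (0, 0)).1) →
      0 ≤ bsearch merged n lo hi ∧ bsearch merged n lo hi ≤ merged.length ∧
        (bsearch merged n lo hi = 0 ∨
          (PySem.List.pyGetD merged (bsearch merged n lo hi - 1) (0, 0)).1 ≤ n) ∧
        (bsearch merged n lo hi = merged.length ∨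
          n < (PySem.List.pyGetD merged (bsearch merged n lo hi) (0, 0)).1) := by
  intro k
  induction k using Nat.strong_induction_on with
  | _ k ih =>
    intro lo hi hk h0 hlh hhl hlo hhi
    rw [bsearch]
    by_cases h : lo < hi
    · simp only [h, dite_true]
      have hb := PySem.Int.floordiv_two_mid_bounds (lo := lo) (hi := hi) (le_of_lt h)
      have hmlt : PySem.Int.floordiv (lo + hi) 2 < hi :=
        (PySem.Int.floordiv_lt_iff_lt_mul (by omega)).mpr (by omega)
      by_cases hc : (PySem.List.pyGetD merged (PySem.Int.floordiv (lo + hi) 2) (0, 0)).1 ≤ n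
      · simp only [hc, if_true]
        exact ih (hi - (PySem.Int.floordiv (lo + hi) 2 + 1)).toNat (by omega)
          (PySem.Int.floordiv (lo + hi) 2 + 1) hi rfl (by omega) (by omega) hhl
          (Or.inr (by simpa using hc)) hhi
      · simp only [hc, if_false]
        exact ih (PySem.Int.floordiv (lo + hi) 2 - lo).toNat (by omega)
          lo (PySem.Int.floordiv (lo + hi) 2) rfl h0 (by omega) (by omega)
          hlo (Or.inr (by omega))
    · simp only [h, dite_false]
      have hlh' : lo = hi := by omega
      refine ⟨h0, by omega, hlo, ?_⟩
      rcases hhi with h' | h'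
      · left; omega
      · right; rwa [hlh']

-- per-number: B's check is exactly non-coverage, given the merged invariant
lemma check_iff (merged : List (Int × Int)) (hg : Good merged) (n : Int) :
    (bsearch merged n 0 (PySem.List.len merged) = 0 ∨
      (PySem.List.pyGetD merged (bsearch merged n 0 (PySem.List.len merged) - 1) (0, 0)).2 < n)
      ↔ ¬ Cov n merged := by
  obtain ⟨h0r, hrlen, hr1, hr2⟩ := bsearch_spec merged n
    ((PySem.List.len merged - 0).toNat) 0 (PySem.List.len merged) rfl le_rfl
    (by simp [PySem.List.len_eq]) (by simp [PySem.List.len_eq]) (Or.inl rfl)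
    (Or.inl (by simp [PySem.List.len_eq]))
  set r := bsearch merged n 0 (PySem.List.len merged) with hrdef
  have hrlen' : r ≤ (merged.length : Int) := hrlen
  have hpw := List.pairwise_iff_getElem.1 hg
  have mono : ∀ (i j : Nat) (hi : i < merged.length) (hj : j < merged.length),
      i ≤ j → merged[i].1 ≤ merged[j].1 := by
    intro i j hi hj hij
    rcases Nat.eq_or_lt_of_le hij with rfl | hlt
    · exact le_refl _
    · exact (hpw i j hi hj hlt).1
  by_cases hr0 : r = 0
  · refine iff_of_true (Or.inl hr0) ?_
    rintro ⟨a, ha, hc1, hc2⟩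
    obtain ⟨j, hj, rfl⟩ := List.mem_iff_getElem.1 ha
    rcases hr2 with hlen | hlt
    · omega
    · have e : PySem.List.pyGetD merged r (0, 0) = merged[(0 : Nat)] := by
        rw [hr0]
        exact PySem.List.pyGetD_eq_getElem _ _ (by omega) (by omega)
      rw [e] at hlt
      have := mono 0 j (by omega) hj (by omega)
      omega
  · have hrpos : 0 < r := by omega
    have ht : (r - 1).toNat < merged.length := by omega
    have e1 : PySem.List.pyGetD merged (r - 1) (0, 0) = merged[(r - 1).toNat] :=
      PySem.List.pyGetD_eq_getElem _ _ (by omega) (by omega)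
    have hst : merged[(r - 1).toNat].1 ≤ n := by
      rcases hr1 with h | h
      · omega
      · rwa [e1] at h
    rw [e1]
    constructor
    · rintro (h | hv)
      · exact absurd h hr0
      · rintro ⟨a, ha, hc1, hc2⟩
        obtain ⟨j, hj, rfl⟩ := List.mem_iff_getElem.1 ha
        rcases lt_trichotomy j (r - 1).toNat with hjt | hjt | hjt
        · have := (hpw j (r - 1).toNat hj ht hjt).2
          omega
        · subst hjt; omega
        · rcases hr2 with hlen | hlt
          · omega
          · have e2 : PySem.List.pyGetD merged r (0, 0) = merged[r.toNat] :=
              PySem.List.pyGetD_eq_getElem _ _ (by omega) (by omega)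
            rw [e2] at hlt
            have := mono r.toNat j (by omega) hj (by omega)
            omega
    · intro hnc
      right
      by_contra hle
      exact hnc ⟨merged[(r - 1).toNat], List.getElem_mem ht, hst, by omega⟩


-- ===== VERDICT (by name: the statement is the Claim_ definition above) =====
theorem get_invalid_numbers_spec : Claim_equal_get_invalid_numbers := by
  intro rules numbers _ _
  unfold Spec_get_invalid_numbers get_invalid_numbers get_invalid_numbers_alt
  simp only [PySem.List.foldl_append_eq_flatMap, List.nil_append]
  set merged := (PySem.List.sorted
      (rules.flatMap fun rule =>
        [(PySem.List.pyGetD rule 1 0, PySem.List.pyGetD rule 2 0),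
         (PySem.List.pyGetD rule 3 0, PySem.List.pyGetD rule 4 0)])
      (fun iv => iv.1) false).foldl mergeStep [] with hmdef
  have hps : (PySem.List.sorted (ivsOf rules) (fun iv => iv.1) false).Pairwise
      (fun p q => p.1 ≤ q.1) := PySem.List.sorted_pairwise _ _
  have hmi := merge_inv (PySem.List.sorted (ivsOf rules) (fun iv => iv.1) false) []
    List.Pairwise.nil hps (by intro a _ m hm; cases hm)
  have hg : Good merged := hmi.1
  have hcov : ∀ n, Cov n merged ↔ Cov n (ivsOf rules) := by
    intro n
    rw [hmdef, show (rules.flatMap fun rule =>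
        [(PySem.List.pyGetD rule 1 0, PySem.List.pyGetD rule 2 0),
         (PySem.List.pyGetD rule 3 0, PySem.List.pyGetD rule 4 0)]) = ivsOf rules from rfl,
      hmi.2 n]
    have hperm := PySem.List.sorted_perm (ivsOf rules) (fun iv => iv.1) false
    constructor
    · rintro (⟨a, ha, _⟩ | ⟨a, ha, hc⟩)
      · cases ha
      · exact ⟨a, hperm.mem_iff.1 ha, hc⟩
    · rintro ⟨a, ha, hc⟩
      exact Or.inr ⟨a, hperm.mem_iff.2 ha, hc⟩
  rw [show (fun (invalid : List Int) number =>
        if coveredByAny rules number then invalid else invalid ++ [number]) =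
      (fun (invalid : List Int) number =>
        if (!coveredByAny rules number) = true then invalid ++ [number] else invalid) from
    funext fun acc => funext fun x => by cases h : coveredByAny rules x <;> simp]
  rw [PySem.List.foldl_append_if_eq_filter, PySem.List.foldl_append_ite_eq_filter,
    List.nil_append, List.nil_append]
  refine List.filter_congr ?_
  intro n _
  have h1 := coveredByAny_iff rules n
  have h2 := check_iff merged hg n
  have h3 := hcov n
  cases hb : coveredByAny rules n
  · have hnc : ¬ Cov n merged := by
      rw [h3, ← h1]; simp [hb]
    simp only [Bool.not_false]
    exact (decide_eq_true (h2.mpr hnc)).symm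
  · have hcv : Cov n merged := by rw [h3]; exact h1.mp hb
    simp only [Bool.not_true]
    exact (decide_eq_false fun hch => (h2.mp hch) hcv).symm
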